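-- pv_equiv track=rewrite | github.com/blossom9601-art/11 | scripts/_codemod_remove_firewalld_blocks.py | _consume_iife_suffix
-- ===== SOURCE A (Python) =====
-- def _consume_iife_suffix(text: str, close_brace_index: int) -> int:
--     """Return end index (exclusive) after consuming '})();' (with whitespace)."""
--
--     i = close_brace_index + 1
--     while i < len(text) and text[i].isspace():
--         i += 1
--
--     # Expect ')();' with optional whitespace in between.
--     # Accept common variants: '})();', '})()' + ';', '})();\n'
--     def skip_ws(j: int) -> int:
--         while j < len(text) and text[j].isspace():
--             j += 1
--         return j
--
--     i = skip_ws(i)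
--     if i < len(text) and text[i] == ")":
--         i += 1
--         i = skip_ws(i)
--     if i < len(text) and text[i] == "(":
--         i += 1
--         i = skip_ws(i)
--     if i < len(text) and text[i] == ")":
--         i += 1
--         i = skip_ws(i)
--     if i < len(text) and text[i] == ";":
--         i += 1
--
--     return i
-- ===== SOURCE B (Python) =====
-- def _consume_iife_suffix(text: str, close_brace_index: int) -> int:
--     """Return end index (exclusive) after consuming '})();' (with whitespace)."""
--     rest = text[close_brace_index + 1:]
--     consumed = 0
--     for tok in ")();":
--         stripped = rest.lstrip()
--         consumed += len(rest) - len(stripped)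
--         if stripped.startswith(tok):
--             consumed += 1
--             rest = stripped[1:]
--         else:
--             rest = stripped
--     return close_brace_index + 1 + consumed
-- ===== Notes on version B (the rewrite author's own statement) =====
-- stated objective: simpler
-- what changed: Replaces the index-based forward scan (an inline whitespace loop, a nested skip_ws helper and four copy-pasted if-blocks) by one uniform loop over the token string ')();' that works on the sliced suffix with lstrip/startswith and an accumulated consumed count.
-- outside the precondition, e.g. on _consume_iife_suffix(')) ', -2): A returns 3, B returns 0
import Mathlib
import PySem

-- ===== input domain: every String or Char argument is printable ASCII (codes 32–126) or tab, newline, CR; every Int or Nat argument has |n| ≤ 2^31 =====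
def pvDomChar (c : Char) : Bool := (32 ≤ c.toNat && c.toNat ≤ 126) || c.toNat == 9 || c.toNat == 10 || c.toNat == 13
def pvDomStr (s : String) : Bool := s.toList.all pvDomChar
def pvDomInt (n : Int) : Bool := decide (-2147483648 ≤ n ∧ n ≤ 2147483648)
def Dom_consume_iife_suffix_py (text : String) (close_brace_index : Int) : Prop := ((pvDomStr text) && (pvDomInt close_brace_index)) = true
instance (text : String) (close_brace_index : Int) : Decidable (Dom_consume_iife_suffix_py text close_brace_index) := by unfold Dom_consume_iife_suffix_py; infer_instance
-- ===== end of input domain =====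

-- B replaces A's index scan (inline ws-loop + skip_ws helper + four copy-pasted if-blocks) by one
-- uniform loop over the token string ")();" on the sliced suffix; equal for close_brace_index ≥ -1.


-- ===== PORT A =====
-- the inline `while i < len(text) and text[i].isspace(): i += 1` loop
def pvAWhileWs (cs : List Char) (j : Int) : Int :=
  if h : j < (cs.length : Int) then
    match PySem.List.pyGet? cs j with
    | some c => if PySem.Chars.isspace c then pvAWhileWs cs (j + 1) else j
    | none => j   -- Python raises IndexError here (j < -len; excluded by Pre_)
  else j
termination_by ((cs.length : Int) - j).toNat
decreasing_by omega

-- the nested helper `def skip_ws(j)` (same body as the inline loop, as in the Python)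
def pvASkipWs (cs : List Char) (j : Int) : Int :=
  if h : j < (cs.length : Int) then
    match PySem.List.pyGet? cs j with
    | some c => if PySem.Chars.isspace c then pvASkipWs cs (j + 1) else j
    | none => j   -- Python raises IndexError here (j < -len; excluded by Pre_)
  else j
termination_by ((cs.length : Int) - j).toNat
decreasing_by omega

def consume_iife_suffix_py (text : String) (close_brace_index : Int) : Int :=
  let cs := text.toList
  let i0 := close_brace_index + 1
  let i1 := pvAWhileWs cs i0
  let i2 := pvASkipWs cs i1
  let i3 := if i2 < (cs.length : Int) ∧ PySem.List.pyGet? cs i2 = some ')' then pvASkipWs cs (i2 + 1) else i2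
  let i4 := if i3 < (cs.length : Int) ∧ PySem.List.pyGet? cs i3 = some '(' then pvASkipWs cs (i3 + 1) else i3
  let i5 := if i4 < (cs.length : Int) ∧ PySem.List.pyGet? cs i4 = some ')' then pvASkipWs cs (i4 + 1) else i4
  if i5 < (cs.length : Int) ∧ PySem.List.pyGet? cs i5 = some ';' then i5 + 1 else i5

-- ===== PORT B =====
-- body of B's `for tok in ")();"` loop: lstrip, count the stripped whitespace, maybe consume tok
def pvBStep (st : List Char × Int) (tok : Char) : List Char × Int :=
  let stripped := PySem.Chars.lstrip st.1
  let consumed := st.2 + ((st.1.length : Int) - (stripped.length : Int))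
  if PySem.Chars.startswith stripped [tok] then
    (PySem.Chars.slice stripped (some 1) none, consumed + 1)   -- stripped[1:]
  else
    (stripped, consumed)

def consume_iife_suffix_py_alt (text : String) (close_brace_index : Int) : Int :=
  let rest0 := PySem.Chars.slice text.toList (some (close_brace_index + 1)) none   -- text[close_brace_index+1:]
  let r := [')', '(', ')', ';'].foldl pvBStep (rest0, 0)
  close_brace_index + 1 + r.2

-- ===== PRECONDITION & SPEC =====
-- Pre_ excludes close_brace_index < -1, where A reads text[i] with a negative index: Python's
-- negative-index wraparound makes A rescan from a wrapped position (or raise IndexError when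
-- close_brace_index + 1 < -len(text) on nonempty text), while B's slice-based scan treats the
-- suffix plainly; -1 ≤ close_brace_index covers the function's intended domain (an index of a
-- close brace in text).
def Pre_consume_iife_suffix_py (text : String) (close_brace_index : Int) : Prop :=
  -1 ≤ close_brace_index
instance (text : String) (close_brace_index : Int) : Decidable (Pre_consume_iife_suffix_py text close_brace_index) := by
  unfold Pre_consume_iife_suffix_py; infer_instance

def pvWitness_consume_iife_suffix_py : String × Int := ("})  ( ) ;", 0)

def Spec_consume_iife_suffix_py (text : String) (close_brace_index : Int) (out : Int) : Prop := out = consume_iife_suffix_py_alt text close_brace_index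
instance (text : String) (close_brace_index : Int) (out : Int) : Decidable (Spec_consume_iife_suffix_py text close_brace_index out) := by unfold Spec_consume_iife_suffix_py; infer_instance

-- ===== CLAIM (what is proved, stated in full; the proofs are below) =====
def Claim_equal_consume_iife_suffix_py : Prop := ∀ (text : String) (close_brace_index : Int), Dom_consume_iife_suffix_py text close_brace_index → Pre_consume_iife_suffix_py text close_brace_index → Spec_consume_iife_suffix_py text close_brace_index (consume_iife_suffix_py text close_brace_index)

-- ===== LEMMAS AND PROOFS =====

theorem drop_of_get (cs : List Char) (n : Nat) (c : Char) (h : cs[n]? = some c) :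
    cs.drop n = c :: cs.drop (n + 1) := by
  have hn : n < cs.length := by
    by_contra hc
    simp [List.getElem?_eq_none (by omega : cs.length ≤ n)] at h
  rw [List.drop_eq_getElem_cons hn]
  have : cs[n] = c := by
    have := List.getElem?_eq_getElem hn
    rw [this] at h; exact Option.some.inj h
  rw [this]

-- the whitespace loop characterised: it advances over exactly the leading whitespace of the suffix
theorem pvASkipWs_spec (cs : List Char) (j : Int) (h : 0 ≤ j) :
    pvASkipWs cs j = j + (((cs.drop j.toNat).takeWhile PySem.Chars.isspace).length : Int) := by
  revert h
  induction j using pvASkipWs.induct cs with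
  | case1 x hlt c hget hsp ih =>
    intro h
    rw [pvASkipWs]
    simp only [hlt, dite_true, hget, hsp, if_true]
    rw [PySem.List.pyGet?_of_nonneg cs h] at hget
    have hdrop := drop_of_get cs x.toNat c hget
    rw [ih (by omega), hdrop, List.takeWhile_cons, hsp]
    have : (x + 1).toNat = x.toNat + 1 := by omega
    rw [this]
    simp; omega
  | case2 x hlt c hget hsp =>
    intro h
    rw [pvASkipWs]
    simp only [hlt, dite_true, hget]
    rw [if_neg hsp]
    rw [PySem.List.pyGet?_of_nonneg cs h] at hget
    have hdrop := drop_of_get cs x.toNat c hget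
    rw [hdrop, List.takeWhile_cons]
    simp [hsp]
  | case3 x hlt hget =>
    intro h
    rw [PySem.List.pyGet?_of_nonneg cs h] at hget
    have : x.toNat < cs.length := by omega
    simp [List.getElem?_eq_getElem this] at hget
  | case4 x hlt =>
    intro h
    rw [pvASkipWs]
    simp only [hlt, dite_false]
    rw [List.drop_eq_nil_of_le (by omega : cs.length ≤ x.toNat)]
    simp

-- the two textually identical loops compute the same function
theorem pvAWhileWs_eq (cs : List Char) (j : Int) : pvAWhileWs cs j = pvASkipWs cs j := by
  induction j using pvAWhileWs.induct cs with
  | case1 x hlt c hget hsp ih =>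
    rw [pvAWhileWs, pvASkipWs]
    simp only [hlt, dite_true, hget, hsp, if_true, ih]
  | case2 x hlt c hget hsp =>
    rw [pvAWhileWs, pvASkipWs]
    simp only [hlt, dite_true, hget]
    rw [if_neg hsp, if_neg hsp]
  | case3 x hlt hget =>
    rw [pvAWhileWs, pvASkipWs]
    simp only [hlt, dite_true, hget]
  | case4 x hlt =>
    rw [pvAWhileWs, pvASkipWs]
    simp only [hlt, dite_false]

theorem drop_length_takeWhile {α : Type} (p : α → Bool) (l : List α) :
    l.drop (l.takeWhile p).length = l.dropWhile p := by
  induction l with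
  | nil => rfl
  | cons a l ih =>
    by_cases hp : p a
    · simpa [List.takeWhile_cons, List.dropWhile_cons, hp] using ih
    · simp [List.takeWhile_cons, List.dropWhile_cons, hp]

theorem pvASkipWs_drop (cs : List Char) (j : Int) (h : 0 ≤ j) :
    cs.drop (pvASkipWs cs j).toNat = (cs.drop j.toNat).dropWhile PySem.Chars.isspace := by
  rw [pvASkipWs_spec cs j h]
  have hn : (j + (((cs.drop j.toNat).takeWhile PySem.Chars.isspace).length : Int)).toNat
      = j.toNat + ((cs.drop j.toNat).takeWhile PySem.Chars.isspace).length := by omega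
  rw [hn, ← List.drop_drop]
  exact drop_length_takeWhile PySem.Chars.isspace (cs.drop j.toNat)

theorem pvASkipWs_le (cs : List Char) (j : Int) (h : 0 ≤ j) : j ≤ pvASkipWs cs j := by
  rw [pvASkipWs_spec cs j h]; omega

theorem takeWhile_dropWhile_nil {α : Type} (p : α → Bool) (l : List α) :
    ((l.dropWhile p).takeWhile p) = [] := by
  induction l with
  | nil => rfl
  | cons a l ih =>
    by_cases hp : p a
    · simpa [List.dropWhile_cons, hp] using ih
    · simp [List.dropWhile_cons, hp]

theorem pvASkipWs_idem (cs : List Char) (j : Int) (h : 0 ≤ j) :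
    pvASkipWs cs (pvASkipWs cs j) = pvASkipWs cs j := by
  have h2 : 0 ≤ pvASkipWs cs j := le_trans h (pvASkipWs_le cs j h)
  rw [pvASkipWs_spec cs _ h2, pvASkipWs_drop cs j h, takeWhile_dropWhile_nil]
  simp

-- the token test of A, read on the suffix
theorem pvTok_iff (cs : List Char) (c : Char) (j : Int) (h : 0 ≤ j) :
    (j < (cs.length : Int) ∧ PySem.List.pyGet? cs j = some c) ↔ (cs.drop j.toNat).head? = some c := by
  rw [List.head?_drop]
  constructor
  · rintro ⟨hlt, hget⟩
    rw [PySem.List.pyGet?_of_nonneg cs h] at hget; exact hget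
  · intro hget
    have hlt : j.toNat < cs.length := by
      by_contra hc
      simp [List.getElem?_eq_none (by omega : cs.length ≤ j.toNat)] at hget
    exact ⟨by omega, by rw [PySem.List.pyGet?_of_nonneg cs h]; exact hget⟩

theorem lstrip_eq (l : List Char) : PySem.Chars.lstrip l = l.dropWhile PySem.Chars.isspace := rfl

theorem startswith_single (l : List Char) (c : Char) :
    PySem.Chars.startswith l [c] = (l.head? == some c) := by
  cases l with
  | nil => simp [PySem.Chars.startswith]
  | cons a t => simp [PySem.Chars.startswith, List.isPrefixOf, eq_comm]

theorem slice_one (l : List Char) : PySem.Chars.slice l (some 1) none = l.drop 1 := by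
  simp only [PySem.Chars.slice_eq_listSlice]
  rw [PySem.List.slice_from l (by norm_num : (0:Int) ≤ 1)]
  rfl

-- one step of A (trailing skip absorbed into the next step's leading skip) matches one pvBStep
theorem pvStep_main (cs rest : List Char) (tok : Char) (i k : Int)
    (h0 : 0 ≤ i) (hd : cs.drop i.toNat = rest) :
    (0 ≤ (let j := pvASkipWs cs i; if j < (cs.length : Int) ∧ PySem.List.pyGet? cs j = some tok then j + 1 else j)) ∧
    cs.drop (let j := pvASkipWs cs i; if j < (cs.length : Int) ∧ PySem.List.pyGet? cs j = some tok then j + 1 else j).toNat = (pvBStep (rest, k) tok).1 ∧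
    (let j := pvASkipWs cs i; if j < (cs.length : Int) ∧ PySem.List.pyGet? cs j = some tok then j + 1 else j) = i + ((pvBStep (rest, k) tok).2 - k) := by
  have hj0 : 0 ≤ pvASkipWs cs i := le_trans h0 (pvASkipWs_le cs i h0)
  have hjd : cs.drop (pvASkipWs cs i).toNat = rest.dropWhile PySem.Chars.isspace := by
    rw [pvASkipWs_drop cs i h0, hd]
  have hjs : pvASkipWs cs i = i + ((rest.takeWhile PySem.Chars.isspace).length : Int) := by
    rw [pvASkipWs_spec cs i h0, hd]
  have hlen : (rest.takeWhile PySem.Chars.isspace).length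
      = rest.length - (rest.dropWhile PySem.Chars.isspace).length := by
    have := List.takeWhile_append_dropWhile (p := PySem.Chars.isspace) (l := rest)
    have hl : (rest.takeWhile PySem.Chars.isspace).length + (rest.dropWhile PySem.Chars.isspace).length = rest.length := by
      rw [← List.length_append, this]
    omega
  simp only [pvBStep, lstrip_eq, startswith_single]
  by_cases htok : (rest.dropWhile PySem.Chars.isspace).head? = some tok
  · have hcond : pvASkipWs cs i < (cs.length : Int) ∧ PySem.List.pyGet? cs (pvASkipWs cs i) = some tok :=
      (pvTok_iff cs tok _ hj0).mpr (by rw [hjd]; exact htok)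
    rw [if_pos hcond]
    have hdrop1 : cs.drop (pvASkipWs cs i + 1).toNat = (rest.dropWhile PySem.Chars.isspace).drop 1 := by
      have : (pvASkipWs cs i + 1).toNat = (pvASkipWs cs i).toNat + 1 := by omega
      rw [this, ← List.drop_drop, hjd]
    have hbeq : (((rest.dropWhile PySem.Chars.isspace).head? == some tok) : Bool) = true := by
      simp [htok]
    simp only [hbeq, if_true]
    have hle : (rest.dropWhile PySem.Chars.isspace).length ≤ rest.length :=
      List.length_dropWhile_le ..
    refine ⟨by omega, ?_, ?_⟩
    · rw [hdrop1, slice_one]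
    · rw [hjs]; push_cast [hlen]; omega
  · have hcond : ¬ (pvASkipWs cs i < (cs.length : Int) ∧ PySem.List.pyGet? cs (pvASkipWs cs i) = some tok) := by
      intro hc
      exact htok (by rw [← hjd]; exact (pvTok_iff cs tok _ hj0).mp hc)
    rw [if_neg hcond]
    have hbeq : (((rest.dropWhile PySem.Chars.isspace).head? == some tok) : Bool) = false := by
      simp [htok]
    simp only [hbeq, Bool.false_eq_true, if_false]
    have hle : (rest.dropWhile PySem.Chars.isspace).length ≤ rest.length :=
      List.length_dropWhile_le ..
    refine ⟨hj0, hjd, ?_⟩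
    rw [hjs]; push_cast [hlen]; omega

-- proof-only abbreviation for one A step in leading-skip form
def pvAStep (cs : List Char) (i : Int) (c : Char) : Int :=
  let j := pvASkipWs cs i
  if j < (cs.length : Int) ∧ PySem.List.pyGet? cs j = some c then j + 1 else j

theorem pvStep_main' (cs rest : List Char) (tok : Char) (i k : Int)
    (h0 : 0 ≤ i) (hd : cs.drop i.toNat = rest) :
    0 ≤ pvAStep cs i tok ∧ cs.drop (pvAStep cs i tok).toNat = (pvBStep (rest, k) tok).1 ∧
      pvAStep cs i tok = i + ((pvBStep (rest, k) tok).2 - k) := by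
  simpa only [pvAStep] using pvStep_main cs rest tok i k h0 hd

theorem pvAStep_def (cs : List Char) (i : Int) (c : Char) :
    (if pvASkipWs cs i < (cs.length : Int) ∧ PySem.List.pyGet? cs (pvASkipWs cs i) = some c
      then pvASkipWs cs i + 1 else pvASkipWs cs i) = pvAStep cs i c := rfl

theorem pvAStep_skip (cs : List Char) (i : Int) (c : Char) (h : 0 ≤ i) :
    (if pvASkipWs cs i < (cs.length : Int) ∧ PySem.List.pyGet? cs (pvASkipWs cs i) = some c
      then pvASkipWs cs (pvASkipWs cs i + 1) else pvASkipWs cs i) = pvASkipWs cs (pvAStep cs i c) := by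
  simp only [pvAStep]
  by_cases hc : pvASkipWs cs i < (cs.length : Int) ∧ PySem.List.pyGet? cs (pvASkipWs cs i) = some c
  · rw [if_pos hc, if_pos hc]
  · rw [if_neg hc, if_neg hc, pvASkipWs_idem cs i h]

theorem pv_main (text : String) (close_brace_index : Int) (hpre : -1 ≤ close_brace_index) :
    consume_iife_suffix_py text close_brace_index = consume_iife_suffix_py_alt text close_brace_index := by
  have h0 : 0 ≤ close_brace_index + 1 := by omega
  set cs := text.toList with hcs
  set i0 := close_brace_index + 1 with hi0
  have H1 := pvStep_main' cs (cs.drop i0.toNat) ')' i0 0 h0 rfl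
  have N1 : 0 ≤ pvAStep cs i0 ')' := H1.1
  have H2 := pvStep_main' cs ((pvBStep (cs.drop i0.toNat, 0) ')').1) '(' (pvAStep cs i0 ')')
    ((pvBStep (cs.drop i0.toNat, 0) ')').2) N1 H1.2.1
  simp only [Prod.mk.eta] at H2
  have N2 : 0 ≤ pvAStep cs (pvAStep cs i0 ')') '(' := H2.1
  have H3 := pvStep_main' cs ((pvBStep (pvBStep (cs.drop i0.toNat, 0) ')') '(').1) ')'
    (pvAStep cs (pvAStep cs i0 ')') '(') ((pvBStep (pvBStep (cs.drop i0.toNat, 0) ')') '(').2) N2 H2.2.1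
  simp only [Prod.mk.eta] at H3
  have N3 : 0 ≤ pvAStep cs (pvAStep cs (pvAStep cs i0 ')') '(') ')' := H3.1
  have H4 := pvStep_main' cs ((pvBStep (pvBStep (pvBStep (cs.drop i0.toNat, 0) ')') '(') ')').1) ';'
    (pvAStep cs (pvAStep cs (pvAStep cs i0 ')') '(') ')')
    ((pvBStep (pvBStep (pvBStep (cs.drop i0.toNat, 0) ')') '(') ')').2) N3 H3.2.1
  simp only [Prod.mk.eta] at H4
  simp only [consume_iife_suffix_py, consume_iife_suffix_py_alt, List.foldl, ← hcs, ← hi0]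
  rw [pvAWhileWs_eq]
  rw [pvASkipWs_idem cs i0 h0]
  rw [pvAStep_skip cs i0 ')' h0]
  rw [pvAStep_skip cs _ '(' N1]
  rw [pvAStep_skip cs _ ')' N2]
  rw [PySem.Chars.slice_eq_listSlice, PySem.List.slice_from _ h0]
  have e1 := H1.2.2
  have e2 := H2.2.2
  have e3 := H3.2.2
  have e4 := H4.2.2
  rw [pvAStep_def]
  omega

-- ===== VERDICT (by name: the statement is the Claim_ definition above) =====
theorem consume_iife_suffix_py_spec : Claim_equal_consume_iife_suffix_py := by
  intro text close_brace_index _ hpre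
  exact pv_main text close_brace_index hpre
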